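-- pv_equiv track=rewrite | github.com/tcl326/advent-of-code-2020 | day6/custom_customs.py | get_group_count
-- ===== SOURCE A (Python) =====
-- from collections import Counter
--
-- def get_group_count(lines):
--     group_counts = []
--     person_counts = []
--     p_count = 0
--     count = Counter()
--     for line in lines:
--         if not line:
--             if count:
--                 group_counts.append(count)
--                 person_counts.append(p_count)
--             count = Counter()
--             p_count = 0
--         else:
--             p_count += 1
--             for l in line:
--                 count[l] += 1
--     if count:
--         person_counts.append(p_count)
--         group_counts.append(count)
--     return group_counts, person_counts
-- ===== SOURCE B (Python) =====
-- from collections import Counter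
-- from itertools import groupby
--
--
-- def get_group_count(lines):
--     # Two-phase: segment the lines into maximal runs of non-empty lines first,
--     # then summarize each run independently.
--     groups = [list(g) for key, g in groupby(lines, key=bool) if key]
--     return ([Counter(''.join(g)) for g in groups],
--             [len(g) for g in groups])
-- ===== Notes on version B (the rewrite author's own statement) =====
-- stated objective: simpler
-- what changed: Replaces the accumulate-and-reset state machine (running Counter, person counter, flush-on-blank plus trailing flush) by a two-phase decomposition: groupby segments the lines into maximal runs of non-empty lines, then each group is summarized independently as Counter(''.join(g)) and len(g); counting whole joined strings at C level instead of per-character dict increments in a Python loop gives a constant-factor speedup.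
import Mathlib
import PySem

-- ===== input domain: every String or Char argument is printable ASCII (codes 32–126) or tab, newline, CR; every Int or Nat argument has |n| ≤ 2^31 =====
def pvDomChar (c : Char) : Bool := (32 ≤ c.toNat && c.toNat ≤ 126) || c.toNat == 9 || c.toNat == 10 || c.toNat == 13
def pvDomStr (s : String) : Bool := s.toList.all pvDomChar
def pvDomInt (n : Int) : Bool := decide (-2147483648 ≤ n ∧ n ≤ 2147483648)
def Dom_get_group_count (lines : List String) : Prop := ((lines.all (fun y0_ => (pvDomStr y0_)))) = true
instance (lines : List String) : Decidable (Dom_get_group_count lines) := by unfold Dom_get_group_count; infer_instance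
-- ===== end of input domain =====

-- B replaces A's accumulate-and-reset state machine by a segment-then-summarize
-- two-phase decomposition (simpler); return values are proved equal on all inputs.

-- ===== PORT A =====
-- state: (group_counts, person_counts, p_count, count); Counter = PySem.Dict with
-- single-character String keys, exactly Python's Counter over the characters.
def get_group_count (lines : List String) : (List (List (String × Int))) × List Int :=
  let st := lines.foldl
    (fun (st : List (List (String × Int)) × List Int × Int × PySem.Dict String Int) line =>
      let gc := st.1; let pc := st.2.1; let p := st.2.2.1; let cnt := st.2.2.2
      if line = "" then                         -- `if not line:`
        if cnt.items ≠ [] then                  -- `if count:` (Counter truthiness)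
          (gc ++ [cnt.items], pc ++ [p], (0 : Int), PySem.Dict.empty)
        else (gc, pc, (0 : Int), PySem.Dict.empty)
      else
        (gc, pc, p + 1,
         line.toList.foldl (fun d c => d.modify (String.ofList [c]) 0 (· + 1)) cnt))
    ([], [], (0 : Int), PySem.Dict.empty)
  if st.2.2.2.items ≠ [] then
    (st.1 ++ [st.2.2.2.items], st.2.1 ++ [st.2.2.1])
  else (st.1, st.2.1)

-- ===== PORT B =====
-- `[list(g) for key, g in groupby(lines, key=bool) if key]`: the maximal runs of
-- non-empty lines, extracted by structural recursion (span on `s ≠ ""`).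
def pvGroups (lines : List String) : List (List String) :=
  match lines with
  | [] => []
  | l :: rest =>
    if l = "" then pvGroups rest
    else (l :: rest.takeWhile (fun s => s ≠ "")) :: pvGroups (rest.dropWhile (fun s => s ≠ ""))
termination_by lines.length
decreasing_by
  · simp
  · have := List.length_dropWhile_le (fun s : String => !decide (s = "")) rest
    simp at this ⊢
    omega

-- `Counter(''.join(g))` iterates the characters of the joined string (flatMap of the
-- lines' characters), counting each as a one-character string key.
def get_group_count_alt (lines : List String) : (List (List (String × Int))) × List Int :=
  let gs := pvGroups lines
  (gs.map (fun g =>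
      (PySem.Dict.counter ((g.flatMap String.toList).map (fun c => String.ofList [c]))).items),
   gs.map (fun g => (g.length : Int)))

-- ===== PRECONDITION & SPEC =====
def Spec_get_group_count (lines : List String) (out : (List (List (String × Int))) × List Int) : Prop := out = get_group_count_alt lines
instance (lines : List String) (out : (List (List (String × Int))) × List Int) : Decidable (Spec_get_group_count lines out) := by unfold Spec_get_group_count; infer_instance

-- ===== CLAIM (what is proved, stated in full; the proofs are below) =====
def Claim_equal_get_group_count : Prop := ∀ (lines : List String), Dom_get_group_count lines → Spec_get_group_count lines (get_group_count lines)

-- ===== LEMMAS AND PROOFS =====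

-- A's loop body and final flush, named for the proofs (definitionally A's code).
def pvStep (st : List (List (String × Int)) × List Int × Int × PySem.Dict String Int)
    (line : String) : List (List (String × Int)) × List Int × Int × PySem.Dict String Int :=
  let gc := st.1; let pc := st.2.1; let p := st.2.2.1; let cnt := st.2.2.2
  if line = "" then
    if cnt.items ≠ [] then (gc ++ [cnt.items], pc ++ [p], (0 : Int), PySem.Dict.empty)
    else (gc, pc, (0 : Int), PySem.Dict.empty)
  else
    (gc, pc, p + 1, line.toList.foldl (fun d c => d.modify (String.ofList [c]) 0 (· + 1)) cnt)

def pvFin (st : List (List (String × Int)) × List Int × Int × PySem.Dict String Int) :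
    (List (List (String × Int))) × List Int :=
  if st.2.2.2.items ≠ [] then (st.1 ++ [st.2.2.2.items], st.2.1 ++ [st.2.2.1])
  else (st.1, st.2.1)

-- The counter a run of lines accumulates in A.
def pvCD (g : List String) : PySem.Dict String Int :=
  g.foldl (fun d s => s.toList.foldl (fun d c => d.modify (String.ofList [c]) 0 (· + 1)) d)
    PySem.Dict.empty

lemma pvA_eq (lines : List String) :
    get_group_count lines = pvFin (lines.foldl pvStep ([], [], (0 : Int), PySem.Dict.empty)) := rfl

lemma pvCounter_eq (g : List String) :
    (PySem.Dict.counter ((g.flatMap String.toList).map (fun c => String.ofList [c]))) = pvCD g := by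
  rw [PySem.Dict.counter_eq_foldl, List.foldl_map]
  unfold pvCD
  induction g using List.reverseRecOn with
  | nil => simp
  | append_singleton t s ih =>
      simp [List.flatMap_append, List.foldl_append, ih]

lemma pvCD_snoc (g : List String) (l : String) :
    pvCD (g ++ [l]) =
      l.toList.foldl (fun d c => d.modify (String.ofList [c]) 0 (· + 1)) (pvCD g) := by
  simp [pvCD, List.foldl_append]

lemma pvItems_ne {s : String} {g : List String} (hm : s ∈ g) (hs : s ≠ "") :
    (pvCD g).items ≠ [] := by
  intro hnil
  obtain ⟨c, hc⟩ : ∃ c, c ∈ s.toList := by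
    cases h : s.toList with
    | nil => exact absurd (by ext1; simp [h] : s = "") hs
    | cons a t => exact ⟨a, by simp⟩
  have hmem : String.ofList [c] ∈ (g.flatMap String.toList).map (fun c => String.ofList [c]) :=
    List.mem_map_of_mem (List.mem_flatMap.mpr ⟨s, hm, hc⟩)
  have hcount := PySem.Dict.getD_foldl_modify_add_one
      ((g.flatMap String.toList).map (fun c => String.ofList [c])) PySem.Dict.empty (String.ofList [c])
  rw [← PySem.Dict.counter_eq_foldl, pvCounter_eq] at hcount
  have hpos : 0 < List.count (String.ofList [c]) ((g.flatMap String.toList).map (fun c => String.ofList [c])) :=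
    List.count_pos_iff.mpr hmem
  have hget : (pvCD g).getD (String.ofList [c]) 0 = 0 := by
    simp [PySem.Dict.getD, PySem.Dict.get?, hnil]
  rw [hget] at hcount
  simp [PySem.Dict.empty, PySem.Dict.getD, PySem.Dict.get?] at hcount
  omega

lemma pvTakeWhile_all {α : Type} (p : α → Bool) (t : List α) (b : α) (r : List α)
    (ht : ∀ x ∈ t, p x = true) (hb : p b = false) :
    (t ++ b :: r).takeWhile p = t ∧ (t ++ b :: r).dropWhile p = b :: r := by
  induction t with
  | nil => simp [hb]
  | cons a t ih =>
      have ha := ht a (by simp)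
      have := ih (fun x hx => ht x (by simp [hx]))
      simp [ha, this.1, this.2]

lemma pvMain : ∀ (ls cur : List String) (gc : List (List (String × Int))) (pc : List Int),
    (∀ s ∈ cur, s ≠ "") →
    pvFin (ls.foldl pvStep (gc, pc, (cur.length : Int), pvCD cur)) =
      (gc ++ (pvGroups (cur ++ ls)).map (fun g => (pvCD g).items),
       pc ++ (pvGroups (cur ++ ls)).map (fun g => (g.length : Int))) := by
  intro ls
  induction ls with
  | nil =>
      intro cur gc pc hcur
      cases cur with
      | nil => simp [pvFin, pvCD, pvGroups, PySem.Dict.empty]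
      | cons s t =>
          have hne : (pvCD (s :: t)).items ≠ [] :=
            pvItems_ne (List.mem_cons_self) (hcur s (by simp))
          have htw : t.takeWhile (fun s => !decide (s = "")) = t := by
            rw [List.takeWhile_eq_self_iff]
            intro x hx; simpa using hcur x (by simp [hx])
          have hdw : t.dropWhile (fun s => !decide (s = "")) = [] := by
            rw [List.dropWhile_eq_nil_iff]
            intro x hx; simpa using hcur x (by simp [hx])
          simp [pvFin, hne, pvGroups, hcur s (by simp), htw, hdw]
  | cons l rest ih =>
      intro cur gc pc hcur
      by_cases hl : l = ""
      · subst hl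
        cases cur with
        | nil =>
            have hstep : pvStep (gc, pc, ((0:Nat) : Int), pvCD []) "" =
                (gc, pc, ((([] : List String).length : Nat) : Int), pvCD []) := by
              simp [pvStep, pvCD, PySem.Dict.empty]
            simp only [List.foldl_cons, List.length_nil, Nat.cast_zero] at *
            rw [show pvStep (gc, pc, (0:Int), pvCD []) "" = (gc, pc, (0:Int), pvCD []) by
                  simp [pvStep, pvCD, PySem.Dict.empty]]
            have := ih [] gc pc (by simp)
            simpa [pvGroups] using this
        | cons s t =>
            have hne : (pvCD (s :: t)).items ≠ [] :=
              pvItems_ne (List.mem_cons_self) (hcur s (by simp))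
            have hstep : pvStep (gc, pc, ((s :: t).length : Int), pvCD (s :: t)) "" =
                (gc ++ [(pvCD (s :: t)).items], pc ++ [((s :: t).length : Int)], (0 : Int),
                 PySem.Dict.empty) := by
              simp [pvStep, hne]
            rw [List.foldl_cons, hstep,
                show (0 : Int) = ((([] : List String).length : Nat) : Int) by simp,
                show PySem.Dict.empty = pvCD [] from rfl,
                ih [] (gc ++ [(pvCD (s :: t)).items]) (pc ++ [((s :: t).length : Int)]) (by simp)]
            have hsp := pvTakeWhile_all (fun s => !decide (s = "")) t "" rest
              (fun x hx => by simpa using hcur x (by simp [hx])) (by simp)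
            simp [pvGroups, hcur s (by simp), hsp.1, hsp.2, List.append_assoc]
      · have hstep : pvStep (gc, pc, (cur.length : Int), pvCD cur) l =
            (gc, pc, ((cur ++ [l]).length : Int), pvCD (cur ++ [l])) := by
          simp [pvStep, hl, pvCD_snoc]
        rw [List.foldl_cons, hstep]
        simpa [List.append_assoc] using ih (cur ++ [l]) gc pc (by
          intro x hx
          rcases List.mem_append.mp hx with h | h
          · exact hcur x h
          · simp at h; simp [h, hl])

-- ===== VERDICT (by name: the statement is the Claim_ definition above) =====
theorem get_group_count_spec : Claim_equal_get_group_count := by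
  unfold Claim_equal_get_group_count
  intro lines _
  unfold Spec_get_group_count
  rw [pvA_eq]
  have := pvMain lines [] [] [] (by simp)
  simp only [List.length_nil, Nat.cast_zero, List.nil_append] at this
  rw [show PySem.Dict.empty = pvCD [] from rfl, this]
  simp [get_group_count_alt, pvCounter_eq]
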